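-- pv_equiv track=rewrite | github.com/PranavKocharlakota/NeuroNavigator | backend/main.py | _location_bonus
-- ===== SOURCE A (Python) =====
-- def _location_bonus(sites: list[dict], patient_loc: dict | None) -> int:
--     """Return the best location bonus across all sites for a trial.
--
--     Tiers (applied to the best-matching site):
--       Same city + state  → +20
--       Same state only    → +10
--       Same country       → +3
--       No match / unknown →  0
--     """
--     if not patient_loc or not sites:
--         return 0
--
--     p_city    = (patient_loc.get("city")    or "").strip().lower()
--     p_state   = (patient_loc.get("state")   or "").strip().lower()
--     p_country = (patient_loc.get("country") or "").strip().lower()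
--
--     best = -15  # default: assume all international until proven otherwise
--     for site in sites:
--         s_city    = (site.get("city")    or "").strip().lower()
--         s_state   = (site.get("state")   or "").strip().lower()
--         s_country = (site.get("country") or "").strip().lower()
--
--         if p_city and p_state and s_city == p_city and s_state == p_state:
--             return 20  # best possible — no need to check further
--         elif p_state and s_state == p_state:
--             best = max(best, 10)
--         elif p_country and s_country == p_country:
--             best = max(best, 3)
--
--     return best
-- ===== SOURCE B (Python) =====
-- def _norm(d, key):
--     return (d.get(key) or "").strip().lower()
--
-- def _location_bonus(sites: list[dict], patient_loc: dict | None) -> int: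
--     if not patient_loc or not sites:
--         return 0
--     p_city = _norm(patient_loc, "city")
--     p_state = _norm(patient_loc, "state")
--     p_country = _norm(patient_loc, "country")
--     if p_city and p_state and any(
--         _norm(s, "city") == p_city and _norm(s, "state") == p_state for s in sites
--     ):
--         return 20
--     if p_state and any(_norm(s, "state") == p_state for s in sites):
--         return 10
--     if p_country and any(_norm(s, "country") == p_country for s in sites):
--         return 3
--     return -15
-- ===== Notes on version B (the rewrite author's own statement) =====
-- stated objective: idiomatic
-- what changed: Replaced the single accumulating max-loop with early return by tiered short-circuit any() scans over sites, tested highest tier first, so no running 'best' accumulator is maintained.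
import Mathlib
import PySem

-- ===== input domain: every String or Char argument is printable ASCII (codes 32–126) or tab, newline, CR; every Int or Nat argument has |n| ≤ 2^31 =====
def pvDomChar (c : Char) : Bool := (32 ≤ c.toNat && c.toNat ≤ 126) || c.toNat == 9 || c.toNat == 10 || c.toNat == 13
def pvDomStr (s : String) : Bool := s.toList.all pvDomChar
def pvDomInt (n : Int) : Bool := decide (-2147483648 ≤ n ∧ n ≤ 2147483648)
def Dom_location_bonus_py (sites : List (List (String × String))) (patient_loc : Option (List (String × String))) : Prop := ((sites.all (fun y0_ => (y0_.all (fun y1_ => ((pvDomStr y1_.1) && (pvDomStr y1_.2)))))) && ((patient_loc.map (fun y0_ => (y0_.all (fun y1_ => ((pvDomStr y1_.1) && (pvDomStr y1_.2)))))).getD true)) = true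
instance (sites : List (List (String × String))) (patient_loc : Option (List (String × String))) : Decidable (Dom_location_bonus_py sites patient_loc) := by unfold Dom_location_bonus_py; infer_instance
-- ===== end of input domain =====

-- B replaces A's single accumulating loop (early return + running max, default -15) by tiered short-circuit any-scans, highest tier first; objective: idiomatic. Equivalence proved on Dom.
-- ===== PORT A =====
def locNorm (d : List (String × String)) (key : String) : String :=
  PySem.Str.lower (PySem.Str.strip (((d.find? (fun kv => kv.1 == key)).map (fun kv => kv.2)).getD ""))

-- loop of A: early return 20, otherwise accumulate best
def locLoopA (pCity pState pCountry : String) (best : Int) : List (List (String × String)) → Int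
  | [] => best
  | site :: rest =>
    let sCity := locNorm site "city"
    let sState := locNorm site "state"
    let sCountry := locNorm site "country"
    if pCity ≠ "" && pState ≠ "" && sCity == pCity && sState == pState then 20
    else if pState ≠ "" && sState == pState then locLoopA pCity pState pCountry (max best 10) rest
    else if pCountry ≠ "" && sCountry == pCountry then locLoopA pCity pState pCountry (max best 3) rest
    else locLoopA pCity pState pCountry best rest

def location_bonus_py (sites : List (List (String × String))) (patient_loc : Option (List (String × String))) : Int :=
  match patient_loc with
  | none => 0
  | some p =>
    if p.isEmpty || sites.isEmpty then 0
    else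
      let pCity := locNorm p "city"
      let pState := locNorm p "state"
      let pCountry := locNorm p "country"
      locLoopA pCity pState pCountry (-15) sites

-- ===== PORT B =====
-- B's own normalization helper (mirrors _norm in Source B)
def locNormB (d : List (String × String)) (key : String) : String :=
  PySem.Str.lower (PySem.Str.strip (((d.find? (fun kv => kv.1 == key)).map (fun kv => kv.2)).getD ""))

def location_bonus_py_alt (sites : List (List (String × String))) (patient_loc : Option (List (String × String))) : Int :=
  match patient_loc with
  | none => 0
  | some p =>
    if p.isEmpty || sites.isEmpty then 0
    else
      let pCity := locNormB p "city"
      let pState := locNormB p "state"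
      let pCountry := locNormB p "country"
      if pCity ≠ "" && pState ≠ "" &&
          sites.any (fun s => locNormB s "city" == pCity && locNormB s "state" == pState) then 20
      else if pState ≠ "" && sites.any (fun s => locNormB s "state" == pState) then 10
      else if pCountry ≠ "" && sites.any (fun s => locNormB s "country" == pCountry) then 3
      else -15

-- ===== PRECONDITION & SPEC =====
def Spec_location_bonus_py (sites : List (List (String × String))) (patient_loc : Option (List (String × String))) (out : Int) : Prop := out = location_bonus_py_alt sites patient_loc
instance (sites : List (List (String × String))) (patient_loc : Option (List (String × String))) (out : Int) : Decidable (Spec_location_bonus_py sites patient_loc out) := by unfold Spec_location_bonus_py; infer_instance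

-- ===== CLAIM (what is proved, stated in full; the proofs are below) =====
def Claim_equal_location_bonus_py : Prop := ∀ (sites : List (List (String × String))) (patient_loc : Option (List (String × String))), Dom_location_bonus_py sites patient_loc → Spec_location_bonus_py sites patient_loc (location_bonus_py sites patient_loc)

-- ===== LEMMAS AND PROOFS =====

-- abstract tier loop: A's loop shape with the per-site tests abstracted out
def tierLoop {α : Type} (f20 f10 f3 : α → Bool) (best : Int) : List α → Int
  | [] => best
  | x :: rest =>
    if f20 x then 20
    else if f10 x then tierLoop f20 f10 f3 (max best 10) rest
    else if f3 x then tierLoop f20 f10 f3 (max best 3) rest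
    else tierLoop f20 f10 f3 best rest

theorem locLoopA_eq_tierLoop (pCity pState pCountry : String) (best : Int)
    (sites : List (List (String × String))) :
    locLoopA pCity pState pCountry best sites =
      tierLoop (fun s => pCity ≠ "" && pState ≠ "" && locNorm s "city" == pCity && locNorm s "state" == pState)
               (fun s => pState ≠ "" && locNorm s "state" == pState)
               (fun s => pCountry ≠ "" && locNorm s "country" == pCountry) best sites := by
  induction sites generalizing best with
  | nil => rfl
  | cons site rest ih => simp only [locLoopA, tierLoop, ih]

-- the accumulating loop equals the three short-circuit scans (10 > 3 collapses interleaved maxes)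
theorem tierLoop_eq {α : Type} (f20 f10 f3 : α → Bool) (best : Int) (xs : List α) :
    tierLoop f20 f10 f3 best xs =
      if xs.any f20 then 20
      else if xs.any f10 then max best 10
      else if xs.any f3 then max best 3
      else best := by
  induction xs generalizing best with
  | nil => simp [tierLoop]
  | cons x rest ih =>
    simp only [tierLoop, List.any_cons, ih]
    cases h20 : f20 x <;> cases h10 : f10 x <;> by_cases h3 : f3 x = true <;> simp [h3]

theorem any_const_and {α : Type} (b : Bool) (p : α → Bool) (xs : List α) :
    xs.any (fun x => b && p x) = (b && xs.any p) := by
  cases b <;> simp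

theorem locNormB_eq : locNormB = locNorm := rfl

theorem any_const_and₂ {α : Type} (b₁ b₂ : Bool) (p q : α → Bool) (xs : List α) :
    xs.any (fun x => b₁ && b₂ && p x && q x) = (b₁ && b₂ && xs.any (fun x => p x && q x)) := by
  cases b₁ <;> cases b₂ <;> simp

-- ===== VERDICT (by name: the statement is the Claim_ definition above) =====
theorem location_bonus_py_spec : Claim_equal_location_bonus_py := by
  intro sites patient_loc _
  unfold Spec_location_bonus_py location_bonus_py location_bonus_py_alt
  cases patient_loc with
  | none => rfl
  | some p =>
    by_cases hg : (p.isEmpty || sites.isEmpty) = true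
    · simp [hg]
    · simp only [hg, if_false, Bool.false_eq_true, locNormB_eq]
      rw [locLoopA_eq_tierLoop, tierLoop_eq]
      simp only [any_const_and₂, any_const_and]
      rfl
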